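-- pv_equiv track=rewrite | github.com/jason-j-wang/leetcode-solutions | solutions/2975.py | maximizeSquareArea
-- ===== SOURCE A (Python) =====
-- from typing import List
--
-- def maximizeSquareArea(m: int, n: int, hFences: List[int], vFences: List[int]) -> int:
--     mod = 10**9 + 7
--     if m == n:
--         return ((m - 1) ** 2) % mod
--
--     ans = -1
--     hFences.append(m)
--     vFences.append(n)
--
--     hFences.append(1)
--     vFences.append(1)
--
--     hFences.sort()
--     vFences.sort()
--
--     seen = {}
--
--     for h in hFences:
--         for v in vFences:
--             min_edge = min(h, v)
--             offset = (h - min_edge, v - min_edge)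
--             if offset in seen:
--                 ho, vo = seen[offset]
--                 ans = max(ans, (h - ho) ** 2)
--             else:
--                 seen[offset] = (h, v)
--
--     return ans % mod if ans >= 0 else ans
-- ===== SOURCE B (Python) =====
-- def maximizeSquareArea(m, n, hFences, vFences):
--     # Mutates hFences/vFences in place (adds the borders and sorts), except on the m == n early return.
--     mod = 10 ** 9 + 7
--     if m == n:
--         return ((m - 1) ** 2) % mod
--
--     hFences += [m, 1]
--     vFences += [n, 1]
--     hFences.sort()
--     vFences.sort()
--
--     def diffs(xs):
--         return {x - y for i, y in enumerate(xs) for x in xs[i + 1:]}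
--
--     sides = diffs(hFences) & diffs(vFences)
--     if not sides:
--         return -1
--     return max(sides) ** 2 % mod
-- ===== Notes on version B (the rewrite author's own statement) =====
-- stated objective: simpler
-- what changed: Replaces A's stateful nested |h|x|v| scan with a first-seen offset dictionary and a running max by a declarative computation: build the set of pairwise gaps of each (border-extended, sorted) fence list, intersect the two sets, and return the square of the largest common gap, -1 if none; this avoids the cross-product loop with per-pair tuple-dict operations.
-- intended difference: When (m != n and) exactly one direction's border-extended fence list contains a coincident pair and the two directions share no positive gap, A reports 0 (a degenerate zero-area 'square' bounded by the coincident fences on one side only), while B returns -1; -1 is the intended answer since no square can be bounded on both sides there. — e.g. on maximizeSquareArea(3, 2, [1], []): A returns 0, B returns -1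
import Mathlib
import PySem

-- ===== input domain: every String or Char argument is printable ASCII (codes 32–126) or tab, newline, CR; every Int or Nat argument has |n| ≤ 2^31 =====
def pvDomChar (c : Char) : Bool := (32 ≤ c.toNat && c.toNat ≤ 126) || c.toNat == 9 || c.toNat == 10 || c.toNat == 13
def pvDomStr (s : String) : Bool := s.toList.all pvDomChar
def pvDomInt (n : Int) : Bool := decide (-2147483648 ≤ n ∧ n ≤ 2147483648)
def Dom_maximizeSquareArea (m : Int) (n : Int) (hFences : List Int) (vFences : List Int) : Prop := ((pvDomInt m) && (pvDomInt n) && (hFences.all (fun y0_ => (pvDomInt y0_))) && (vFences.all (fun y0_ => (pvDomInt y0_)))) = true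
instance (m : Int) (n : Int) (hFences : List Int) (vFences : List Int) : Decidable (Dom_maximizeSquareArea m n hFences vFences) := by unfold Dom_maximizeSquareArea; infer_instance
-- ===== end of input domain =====

-- B replaces A's stateful first-seen-offset dictionary scan by intersecting the two pairwise-gap
-- sets; both Pythons mutate hFences/vFences identically (append borders, sort) except on the m == n
-- early return — the theorems below are about the return value.

-- ===== PORT A =====
def maximizeSquareArea (m : Int) (n : Int) (hFences : List Int) (vFences : List Int) : Int :=
  let md : Int := 10 ^ 9 + 7
  if m == n then PySem.Int.mod ((m - 1) ^ 2) md
  else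
    -- hFences.append(m); hFences.append(1); hFences.sort()  (and the same for vFences)
    let hs := PySem.List.sorted ((hFences ++ [m]) ++ [1]) (fun x => x) false
    let vs := PySem.List.sorted ((vFences ++ [n]) ++ [1]) (fun x => x) false
    let r := hs.foldl (fun (s : Int × PySem.Dict (Int × Int) (Int × Int)) h =>
      vs.foldl (fun s v =>
        let minEdge := min h v
        let offset := (h - minEdge, v - minEdge)
        match s.2.get? offset with
        | some hv => (max s.1 ((h - hv.1) ^ 2), s.2)
        | none => (s.1, s.2.insert offset (h, v))) s)
      ((-1 : Int), (PySem.Dict.empty : PySem.Dict (Int × Int) (Int × Int)))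
    if r.1 ≥ 0 then PySem.Int.mod r.1 md else r.1

-- ===== PORT B =====
-- diffs(xs) = {x - y for i, y in enumerate(xs) for x in xs[i+1:]}
def pyDiffs (xs : List Int) : PySem.Set Int :=
  PySem.Set.ofList ((PySem.List.enumerate xs 0).flatMap
    (fun iy => (PySem.List.slice xs (some (iy.1 + 1)) none).map (fun x => x - iy.2)))

def maximizeSquareArea_alt (m : Int) (n : Int) (hFences : List Int) (vFences : List Int) : Int :=
  let md : Int := 10 ^ 9 + 7
  if m == n then PySem.Int.mod ((m - 1) ^ 2) md
  else
    -- hFences += [m, 1]; vFences += [n, 1]; both .sort()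
    let hs := PySem.List.sorted (hFences ++ [m, 1]) (fun x => x) false
    let vs := PySem.List.sorted (vFences ++ [n, 1]) (fun x => x) false
    let sides := PySem.Set.inter (pyDiffs hs) (pyDiffs vs)
    -- 'if not sides: return -1; return max(sides) ** 2 % mod'
    match PySem.List.max? sides (fun x => x) with
    | none => -1
    | some s => PySem.Int.mod (s ^ 2) md

-- ===== PRECONDITION & SPEC =====
-- When m ≠ n, exactly one direction's border-extended fence list contains a coincident pair and the
-- two directions share no positive gap, A returns 0 (a degenerate zero-area "square" bounded by
-- coincident fences on one side only) while B returns -1; -1 is the intended answer since no square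
-- can be bounded on both sides there.
def D_maximizeSquareArea (m : Int) (n : Int) (hFences : List Int) (vFences : List Int) : Prop :=
  let H := hFences ++ [m, 1]
  let V := vFences ++ [n, 1]
  m ≠ n ∧ (H.Nodup ↔ ¬ V.Nodup) ∧ ∀ a ∈ H, ∀ b ∈ H, ∀ c ∈ V, ∀ d ∈ V, a - b = c - d → a ≤ b
instance (m : Int) (n : Int) (hFences : List Int) (vFences : List Int) : Decidable (D_maximizeSquareArea m n hFences vFences) := by unfold D_maximizeSquareArea; infer_instance

def Spec_maximizeSquareArea (m : Int) (n : Int) (hFences : List Int) (vFences : List Int) (out : Int) : Prop := ¬ D_maximizeSquareArea m n hFences vFences → out = maximizeSquareArea_alt m n hFences vFences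
instance (m : Int) (n : Int) (hFences : List Int) (vFences : List Int) (out : Int) : Decidable (Spec_maximizeSquareArea m n hFences vFences out) := by unfold Spec_maximizeSquareArea; infer_instance

def pvDiffWitness_maximizeSquareArea : Int × Int × List Int × List Int := (3, 2, [1], [])
def pvDiffWitnessOut_maximizeSquareArea : Int × Int := (0, -1)

-- ===== CLAIM (what is proved, stated in full; the proofs are below) =====
def Claim_unchanged_maximizeSquareArea : Prop := ∀ (m : Int) (n : Int) (hFences : List Int) (vFences : List Int), Dom_maximizeSquareArea m n hFences vFences → Spec_maximizeSquareArea m n hFences vFences (maximizeSquareArea m n hFences vFences)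
def Claim_changed_maximizeSquareArea : Prop := Dom_maximizeSquareArea (pvDiffWitness_maximizeSquareArea.1) (pvDiffWitness_maximizeSquareArea.2.1) (pvDiffWitness_maximizeSquareArea.2.2.1) (pvDiffWitness_maximizeSquareArea.2.2.2) ∧ D_maximizeSquareArea (pvDiffWitness_maximizeSquareArea.1) (pvDiffWitness_maximizeSquareArea.2.1) (pvDiffWitness_maximizeSquareArea.2.2.1) (pvDiffWitness_maximizeSquareArea.2.2.2) ∧ maximizeSquareArea (pvDiffWitness_maximizeSquareArea.1) (pvDiffWitness_maximizeSquareArea.2.1) (pvDiffWitness_maximizeSquareArea.2.2.1) (pvDiffWitness_maximizeSquareArea.2.2.2) = pvDiffWitnessOut_maximizeSquareArea.1 ∧ maximizeSquareArea_alt (pvDiffWitness_maximizeSquareArea.1) (pvDiffWitness_maximizeSquareArea.2.1) (pvDiffWitness_maximizeSquareArea.2.2.1) (pvDiffWitness_maximizeSquareArea.2.2.2) = pvDiffWitnessOut_maximizeSquareArea.2 ∧ pvDiffWitnessOut_maximizeSquareArea.1 ≠ pvDiffWitnessOut_maximizeSquareArea.2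
def Claim_exact_maximizeSquareArea : Prop := ∀ (m : Int) (n : Int) (hFences : List Int) (vFences : List Int), Dom_maximizeSquareArea m n hFences vFences → D_maximizeSquareArea m n hFences vFences → maximizeSquareArea m n hFences vFences ≠ maximizeSquareArea_alt m n hFences vFences

-- ===== LEMMAS AND PROOFS =====

-- the flat list of pairs A's nested loop visits
def pairsL (hs vs : List Int) : List (Int × Int) := hs.flatMap (fun h => vs.map (fun v => (h, v)))

-- A's loop body, on one pair
def stepA (s : Int × PySem.Dict (Int × Int) (Int × Int)) (p : Int × Int) :
    Int × PySem.Dict (Int × Int) (Int × Int) :=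
  let minEdge := min p.1 p.2
  let offset := (p.1 - minEdge, p.2 - minEdge)
  match s.2.get? offset with
  | some hv => (max s.1 ((p.1 - hv.1) ^ 2), s.2)
  | none => (s.1, s.2.insert offset (p.1, p.2))

-- the key A stores for diff d = h - v
def offKey (d : Int) : Int × Int := if 0 ≤ d then (d, 0) else (0, -d)

-- the list of squares A's loop feeds into its running max, with the dictionary
-- abstracted into the partial map F : diff ↦ first h of that diff class
def emits : List (Int × Int) → (Int → Option Int) → List Int
  | [], _ => []
  | p :: ps, F =>
    match F (p.1 - p.2) with
    | some h0 => (p.1 - h0) ^ 2 :: emits ps F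
    | none => emits ps (fun d' => if d' = p.1 - p.2 then some p.1 else F d')

def RelFD (seen : PySem.Dict (Int × Int) (Int × Int)) (F : Int → Option Int) : Prop :=
  ∀ d, seen.get? (offKey d) = (F d).map (fun h => (h, h - d))

-- s is a pairwise difference of xs (positions distinct, value of the later minus the earlier)
def HasDiff (s : Int) (xs : List Int) : Prop := ∃ a b, [a, b].Sublist xs ∧ b - a = s

-- the sides A's loop can feed to its max
def SideOK (hs vs : List Int) (s : Int) : Prop :=
  (HasDiff s hs ∧ HasDiff s vs) ∨ (s = 0 ∧ (HasDiff 0 hs ∨ HasDiff 0 vs))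

lemma offset_eq (h v : Int) : (h - min h v, v - min h v) = offKey (h - v) := by
  unfold offKey
  rcases le_total h v with hle | hle
  · rw [min_eq_left hle]
    split_ifs with h0 <;> (refine Prod.ext ?_ ?_ <;> simp <;> omega)
  · rw [min_eq_right hle]
    split_ifs with h0 <;> (refine Prod.ext ?_ ?_ <;> simp <;> omega)

lemma offKey_inj {d d' : Int} (h : offKey d = offKey d') : d = d' := by
  unfold offKey at h; split_ifs at h <;> simp_all

lemma emits_cons_some {F : Int → Option Int} {p : Int × Int} {ps : List (Int × Int)} {h0 : Int}
    (hF : F (p.1 - p.2) = some h0) : emits (p :: ps) F = (p.1 - h0) ^ 2 :: emits ps F := by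
  simp only [emits, hF]

lemma emits_cons_none {F : Int → Option Int} {p : Int × Int} {ps : List (Int × Int)}
    (hF : F (p.1 - p.2) = none) :
    emits (p :: ps) F = emits ps (fun d' => if d' = p.1 - p.2 then some p.1 else F d') := by
  simp only [emits, hF]

lemma loopA_flat (hs vs : List Int) (init : Int × PySem.Dict (Int × Int) (Int × Int)) :
    hs.foldl (fun s h => vs.foldl (fun s v => stepA s (h, v)) s) init
      = (pairsL hs vs).foldl stepA init := by
  induction hs generalizing init with
  | nil => rfl
  | cons h t ih => simp only [pairsL, List.flatMap_cons, List.foldl_append, List.foldl_cons,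
      List.foldl_map] at *; rw [ih]

lemma loop_emits : ∀ (ps : List (Int × Int)) (F : Int → Option Int) (ans : Int) seen,
    RelFD seen F →
    (ps.foldl stepA (ans, seen)).1 = List.foldl max ans (emits ps F) := by
  intro ps
  induction ps with
  | nil => intro F ans seen _; rfl
  | cons p ps ih =>
    intro F ans seen hrel
    have hoff : (p.1 - min p.1 p.2, p.2 - min p.1 p.2) = offKey (p.1 - p.2) := offset_eq p.1 p.2
    cases hF : F (p.1 - p.2) with
    | some h0 =>
      have hget : seen.get? (offKey (p.1 - p.2)) = some (h0, h0 - (p.1 - p.2)) := by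
        rw [hrel, hF]; rfl
      have hstep : stepA (ans, seen) p = (max ans ((p.1 - h0) ^ 2), seen) := by
        unfold stepA; dsimp only; rw [hoff, hget]
      simp only [List.foldl_cons, emits, hF, hstep]
      exact ih F _ seen hrel
    | none =>
      have hget : seen.get? (offKey (p.1 - p.2)) = none := by rw [hrel, hF]; rfl
      have hstep : stepA (ans, seen) p = (ans, seen.insert (offKey (p.1 - p.2)) (p.1, p.2)) := by
        unfold stepA; dsimp only; rw [hoff, hget]
      have hrel' : RelFD (seen.insert (offKey (p.1 - p.2)) (p.1, p.2))
          (fun d' => if d' = p.1 - p.2 then some p.1 else F d') := by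
        intro d'
        by_cases hd : d' = p.1 - p.2
        · subst hd
          simp [PySem.Dict.get?_insert_self]
        · have hne : offKey d' ≠ offKey (p.1 - p.2) := fun hcon => hd (offKey_inj hcon)
          rw [PySem.Dict.get?_insert_of_ne _ _ hne, hrel]
          simp [hd]
      simp only [List.foldl_cons, emits, hF, hstep]
      exact ih _ ans _ hrel'

lemma relFD_empty : RelFD (PySem.Dict.empty : PySem.Dict (Int × Int) (Int × Int)) (fun _ => none) := by
  intro d; simp [PySem.Dict.get?_empty]

lemma mem_pairsL {p : Int × Int} {hs vs : List Int} :
    p ∈ pairsL hs vs ↔ p.1 ∈ hs ∧ p.2 ∈ vs := by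
  cases p; simp [pairsL]

lemma pairsL_append (l1 l2 vs : List Int) :
    pairsL (l1 ++ l2) vs = pairsL l1 vs ++ pairsL l2 vs := by
  simp [pairsL]

lemma pairsL_cons (y : Int) (l vs : List Int) :
    pairsL (y :: l) vs = vs.map (fun v => (y, v)) ++ pairsL l vs := by
  simp [pairsL]

lemma count_map_pair (h : Int) (vs : List Int) (p : Int × Int) :
    (vs.map (fun v => (h, v))).count p = if p.1 = h then vs.count p.2 else 0 := by
  induction vs with
  | nil => simp
  | cons v vs ih =>
    obtain ⟨p1, p2⟩ := p
    simp only [List.map_cons, List.count_cons, ih]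
    by_cases h1 : p1 = h <;> by_cases h2 : p2 = v <;>
      simp [h1, h2, Prod.ext_iff] <;> omega

lemma count_pairsL (hs vs : List Int) (p : Int × Int) :
    (pairsL hs vs).count p = hs.count p.1 * vs.count p.2 := by
  induction hs with
  | nil => simp [pairsL]
  | cons h hs ih =>
    rw [pairsL_cons, List.count_append, ih, count_map_pair, List.count_cons]
    by_cases h1 : p.1 = h <;> simp [h1]
    · ring
    · exact Or.inl (fun hc => h1 hc.symm)

lemma pair_sublist_of_sorted {xs : List Int} (hst : xs.Pairwise (· ≤ ·))
    {a b : Int} (ha : a ∈ xs) (hb : b ∈ xs) (hab : a < b) : [a, b].Sublist xs := by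
  induction xs with
  | nil => simp at ha
  | cons x t ih =>
    rcases List.mem_cons.mp ha with rfl | hat
    · rcases List.mem_cons.mp hb with rfl | hbt
      · omega
      · exact List.cons_sublist_cons.mpr (List.singleton_sublist.mpr hbt)
    · rcases List.mem_cons.mp hb with rfl | hbt
      · have : b ≤ a := (List.pairwise_cons.mp hst).1 a hat
        omega
      · exact (ih (List.pairwise_cons.mp hst).2 hat hbt).cons x

lemma sublist_pair_decomp {a b : Int} {xs : List Int} (h : [a, b].Sublist xs) :
    ∃ l1 l2, xs = l1 ++ a :: l2 ∧ b ∈ l2 := by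
  rw [List.cons_sublist_iff] at h
  obtain ⟨r1, r2, rfl, ha, hb⟩ := h
  obtain ⟨s, t, rfl⟩ := List.mem_iff_append.mp ha
  exact ⟨s, t ++ r2, by simp, by
    have : b ∈ r2 := List.singleton_sublist.mp hb
    simp [this]⟩

-- soundness: every square A's loop feeds to its max is the square of a SideOK side
lemma emits_sound {hs vs : List Int} (hh : hs.Pairwise (· ≤ ·)) (hv : vs.Pairwise (· ≤ ·)) :
    ∀ (rem proc : List (Int × Int)) (F : Int → Option Int),
    proc ++ rem = pairsL hs vs →
    (∀ d h1, F d = some h1 → (h1, h1 - d) ∈ proc) →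
    ∀ c ∈ emits rem F, ∃ t, 0 ≤ t ∧ c = t ^ 2 ∧ SideOK hs vs t := by
  intro rem
  induction rem with
  | nil => intro proc F _ _ c hc; simp [emits] at hc
  | cons p rem ih =>
    intro proc F hsplit hFinv c hc
    cases hF : F (p.1 - p.2) with
    | some h1 =>
      rw [emits_cons_some (p := p) hF] at hc
      rcases List.mem_cons.mp hc with hc0 | htail
      · subst hc0
        have hq : (h1, h1 - (p.1 - p.2)) ∈ proc := hFinv _ _ hF
        have hqp : (h1, h1 - (p.1 - p.2)) ∈ pairsL hs vs := by
          rw [← hsplit]; exact List.mem_append_left _ hq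
        have hp : p ∈ pairsL hs vs := by
          rw [← hsplit]; exact List.mem_append_right _ List.mem_cons_self
        have hq1 : h1 ∈ hs := (mem_pairsL.mp hqp).1
        have hq2 : h1 - (p.1 - p.2) ∈ vs := (mem_pairsL.mp hqp).2
        have hp1 : p.1 ∈ hs := (mem_pairsL.mp hp).1
        have hp2 : p.2 ∈ vs := (mem_pairsL.mp hp).2
        rcases lt_trichotomy h1 p.1 with hlt | heq | hgt
        · exact ⟨p.1 - h1, by omega, rfl,
            Or.inl ⟨⟨h1, p.1, pair_sublist_of_sorted hh hq1 hp1 hlt, rfl⟩,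
              ⟨h1 - (p.1 - p.2), p.2, pair_sublist_of_sorted hv hq2 hp2 (by omega), by ring⟩⟩⟩
        · -- h1 = p.1 : the emitted square is 0, coming from a duplicated pair
          have hqep : (h1, h1 - (p.1 - p.2)) = p := by
            obtain ⟨p1, p2⟩ := p; simp_all
          have hcount : 2 ≤ (pairsL hs vs).count p := by
            rw [← hsplit, List.count_append]
            have c1 : 0 < proc.count p := List.count_pos_iff.mpr (hqep ▸ hq)
            have c2 : 0 < (p :: rem).count p := by simp
            omega
          rw [count_pairsL] at hcount
          have h1c : 0 < hs.count p.1 := List.count_pos_iff.mpr hp1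
          have h2c : 0 < vs.count p.2 := List.count_pos_iff.mpr hp2
          have hdup : 2 ≤ hs.count p.1 ∨ 2 ≤ vs.count p.2 := by
            by_contra hcon
            rw [not_or, not_le, not_le] at hcon
            have e1 : hs.count p.1 = 1 := by omega
            have e2 : vs.count p.2 = 1 := by omega
            rw [e1, e2] at hcount
            norm_num at hcount
          refine ⟨0, le_refl 0, by rw [heq]; ring, Or.inr ⟨rfl, ?_⟩⟩
          rcases hdup with hd2 | hd2
          · exact Or.inl ⟨p.1, p.1, by
              simpa [List.replicate] using List.replicate_sublist_iff.mpr hd2, by ring⟩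
          · exact Or.inr ⟨p.2, p.2, by
              simpa [List.replicate] using List.replicate_sublist_iff.mpr hd2, by ring⟩
        · exact ⟨h1 - p.1, by omega, by ring,
            Or.inl ⟨⟨p.1, h1, pair_sublist_of_sorted hh hp1 hq1 hgt, rfl⟩,
              ⟨p.2, h1 - (p.1 - p.2), pair_sublist_of_sorted hv hp2 hq2 (by omega), by ring⟩⟩⟩
      · exact ih (proc ++ [p]) F (by simpa using hsplit)
          (fun d h1' hF' => List.mem_append_left _ (hFinv d h1' hF')) c htail
    | none =>
      rw [emits_cons_none (p := p) hF] at hc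
      refine ih (proc ++ [p]) _ (by simpa using hsplit) ?_ c hc
      intro d h1 hF'
      by_cases he : d = p.1 - p.2
      · have hpe : (h1, h1 - d) = p := by
          simp [he] at hF'
          obtain ⟨p1, p2⟩ := p
          simp_all
        rw [hpe]
        exact List.mem_append_right _ (by simp)
      · simp only [if_neg he] at hF'
        exact List.mem_append_left _ (hFinv d h1 hF')

-- once a class has a representative, processing its later pairs emits against it
lemma emits_stable : ∀ (ps2 : List (Int × Int)) (F : Int → Option Int) (h1 h v : Int)
    (ps3 : List (Int × Int)), F (h - v) = some h1 →
    ((h - h1) ^ 2) ∈ emits (ps2 ++ (h, v) :: ps3) F := by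
  intro ps2
  induction ps2 with
  | nil =>
    intro F h1 h v ps3 hF
    simp only [List.nil_append, emits, hF]
    exact List.mem_cons_self
  | cons p ps2 ih =>
    intro F h1 h v ps3 hF
    simp only [List.cons_append, emits]
    cases hFp : F (p.1 - p.2) with
    | some h0 => exact List.mem_cons_of_mem _ (ih F h1 h v ps3 hF)
    | none =>
      apply ih
      have hne : ¬ (h - v = p.1 - p.2) := by
        intro he; rw [he, hFp] at hF; cases hF
      simp [hne, hF]

-- completeness core: two same-class pairs, the earlier one dominating all earlier same-class h's
lemma emits_lower : ∀ (ps1 : List (Int × Int)) (F : Int → Option Int)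
    (h0 v0 h v : Int) (ps2 ps3 : List (Int × Int)),
    h0 - v0 = h - v → h0 ≤ h →
    (∀ h1, F (h0 - v0) = some h1 → h1 ≤ h0) →
    (∀ p ∈ ps1, p.1 - p.2 = h0 - v0 → p.1 ≤ h0) →
    ∃ c ∈ emits (ps1 ++ (h0, v0) :: ps2 ++ (h, v) :: ps3) F, (h - h0) ^ 2 ≤ c := by
  intro ps1
  induction ps1 with
  | nil =>
    intro F h0 v0 h v ps2 ps3 hd hle hFhyp _
    cases hF : F (h0 - v0) with
    | some h1 =>
      have hh1 : h1 ≤ h0 := hFhyp h1 hF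
      have hmem : ((h - h1) ^ 2) ∈ emits (ps2 ++ (h, v) :: ps3) F :=
        emits_stable ps2 F h1 h v ps3 (by rw [← hd]; exact hF)
      refine ⟨(h - h1) ^ 2, ?_, ?_⟩
      · show (h - h1) ^ 2 ∈ emits ((h0, v0) :: (ps2 ++ (h, v) :: ps3)) F
        rw [emits_cons_some (p := (h0, v0)) hF]
        exact List.mem_cons_of_mem _ hmem
      · have := mul_self_le_mul_self (by omega : (0:Int) ≤ h - h0) (by omega : h - h0 ≤ h - h1)
        simpa [pow_two] using this
    | none =>
      have hmem : ((h - h0) ^ 2) ∈ emits (ps2 ++ (h, v) :: ps3)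
          (fun d' => if d' = h0 - v0 then some h0 else F d') := by
        apply emits_stable
        simp [← hd]
      refine ⟨_, ?_, le_refl _⟩
      show (h - h0) ^ 2 ∈ emits ((h0, v0) :: (ps2 ++ (h, v) :: ps3)) F
      rw [emits_cons_none (p := (h0, v0)) hF]
      exact hmem
  | cons p ps1 ih =>
    intro F h0 v0 h v ps2 ps3 hd hle hFhyp hps1
    cases hFp : F (p.1 - p.2) with
    | some hx =>
      obtain ⟨c, hc, hcle⟩ := ih F h0 v0 h v ps2 ps3 hd hle hFhyp
        (fun q hq hq' => hps1 q (List.mem_cons_of_mem _ hq) hq')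
      refine ⟨c, ?_, hcle⟩
      show c ∈ emits (p :: (ps1 ++ (h0, v0) :: ps2 ++ (h, v) :: ps3)) F
      rw [emits_cons_some (p := p) hFp]
      exact List.mem_cons_of_mem _ hc
    | none =>
      have hnew : ∀ h1, (fun d' => if d' = p.1 - p.2 then some p.1 else F d') (h0 - v0) = some h1 → h1 ≤ h0 := by
        intro h1 hF1
        by_cases he : h0 - v0 = p.1 - p.2
        · simp [he] at hF1
          have := hps1 p List.mem_cons_self he.symm
          omega
        · simp only [if_neg he] at hF1
          exact hFhyp h1 hF1
      obtain ⟨c, hc, hcle⟩ := ih (fun d' => if d' = p.1 - p.2 then some p.1 else F d')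
        h0 v0 h v ps2 ps3 hd hle hnew (fun q hq hq' => hps1 q (List.mem_cons_of_mem _ hq) hq')
      refine ⟨c, ?_, hcle⟩
      show c ∈ emits (p :: (ps1 ++ (h0, v0) :: ps2 ++ (h, v) :: ps3)) F
      rw [emits_cons_none (p := p) hFp]
      exact hc

-- completeness: every SideOK side is reached (squared) by some square A's loop emits
lemma emits_reaches {hs vs : List Int} (hh : hs.Pairwise (· ≤ ·))
    (hhne : hs ≠ []) (hvne : vs ≠ []) {s : Int} (hside : SideOK hs vs s) (hs0 : 0 ≤ s) :
    ∃ c ∈ emits (pairsL hs vs) (fun _ => none), s ^ 2 ≤ c := by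
  rcases hside with ⟨⟨y, x, hxy, hxys⟩, ⟨a, b, hab, habs⟩⟩ | ⟨rfl, hdup⟩
  · -- a genuine common difference s = x - y = b - a
    obtain ⟨l1, l2, rfl, hx2⟩ := sublist_pair_decomp hxy
    have hbv : b ∈ vs := hab.subset (by simp)
    have hav : a ∈ vs := hab.subset (by simp)
    obtain ⟨k1, k2, rfl⟩ := List.mem_iff_append.mp hav
    obtain ⟨q1, q2, hq⟩ := List.mem_iff_append.mp
      (mem_pairsL.mpr ⟨hx2, hbv⟩ : ((x, b) : Int × Int) ∈ pairsL l2 (k1 ++ a :: k2))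
    have hps1 : ∀ p ∈ pairsL l1 (k1 ++ a :: k2) ++ k1.map (fun v => (y, v)),
        p.1 - p.2 = y - a → p.1 ≤ y := by
      intro p hp _
      rcases List.mem_append.mp hp with hp1 | hp2
      · exact (List.pairwise_append.mp hh).2.2 p.1 (mem_pairsL.mp hp1).1 y (by simp)
      · obtain ⟨v', _, hv'⟩ := List.mem_map.mp hp2
        rw [← hv']
    obtain ⟨c, hc, hcle⟩ := emits_lower (pairsL l1 (k1 ++ a :: k2) ++ k1.map (fun v => (y, v)))
      (fun _ => none) y a x b (k2.map (fun v => (y, v)) ++ q1) q2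
      (by omega) (by omega) (fun _ h => by cases h) hps1
    refine ⟨c, ?_, by rw [← hxys]; exact hcle⟩
    convert hc using 2
    rw [pairsL_append, pairsL_cons, hq]
    simp [List.append_assoc]
  · -- the degenerate side 0 from a duplicated fence
    rcases hdup with ⟨y, y2, hsub, hdiff⟩ | ⟨a, a2, hsub, hdiff⟩
    · obtain ⟨l1, l2, rfl, hy2⟩ := sublist_pair_decomp hsub
      obtain ⟨w, vs', rfl⟩ := List.exists_cons_of_ne_nil hvne
      obtain ⟨q1, q2, hq⟩ := List.mem_iff_append.mp
        (mem_pairsL.mpr ⟨hy2, by simp⟩ : ((y2, w) : Int × Int) ∈ pairsL l2 (w :: vs'))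
      have hps1 : ∀ p ∈ pairsL l1 (w :: vs'), p.1 - p.2 = y - w → p.1 ≤ y := by
        intro p hp _
        exact (List.pairwise_append.mp hh).2.2 p.1 (mem_pairsL.mp hp).1 y (by simp)
      obtain ⟨c, hc, hcle⟩ := emits_lower (pairsL l1 (w :: vs'))
        (fun _ => none) y w y2 w (vs'.map (fun v => (y, v)) ++ q1) q2
        (by omega) (by omega) (fun _ h => by cases h) hps1
      refine ⟨c, ?_, by have : y2 - y = 0 := hdiff; nlinarith [hcle]⟩
      convert hc using 2
      rw [pairsL_append, pairsL_cons, hq]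
      simp [List.append_assoc]
    · obtain ⟨k1, k2, rfl, ha2⟩ := sublist_pair_decomp hsub
      obtain ⟨m1, m2, rfl⟩ := List.mem_iff_append.mp ha2
      obtain ⟨h0, hs', rfl⟩ := List.exists_cons_of_ne_nil hhne
      have hps1 : ∀ p ∈ k1.map (fun v => (h0, v)), p.1 - p.2 = h0 - a → p.1 ≤ h0 := by
        intro p hp _
        obtain ⟨v', _, hv'⟩ := List.mem_map.mp hp
        rw [← hv']
      obtain ⟨c, hc, hcle⟩ := emits_lower (k1.map (fun v => (h0, v)))
        (fun _ => none) h0 a h0 a2 (m1.map (fun v => (h0, v)))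
        (m2.map (fun v => (h0, v)) ++ pairsL hs' (k1 ++ a :: (m1 ++ a2 :: m2)))
        (by omega) (le_refl _) (fun _ h => by cases h) hps1
      refine ⟨c, ?_, by simpa using hcle⟩
      convert hc using 2
      rw [pairsL_cons]
      simp [List.append_assoc]

lemma mem_pyDiffs_iff {t : Int} {xs : List Int} : t ∈ pyDiffs xs ↔ HasDiff t xs := by
  unfold pyDiffs
  rw [PySem.Set.mem_ofList, List.mem_flatMap]
  constructor
  · rintro ⟨iy, hiy, ht⟩
    obtain ⟨k, hk, rfl⟩ := (PySem.List.mem_enumerate_iff _ _ _).mp hiy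
    obtain ⟨x, hx, rfl⟩ := List.mem_map.mp ht
    have hsl : PySem.List.slice xs (some ((0 + (k : Int), xs[k]).1 + 1)) none = xs.drop (k + 1) := by
      have : ((0 + (k : Int), xs[k]).1 + 1) = (((k + 1 : Nat) : Int)) := by push_cast; ring
      rw [this, PySem.List.slice_from_natCast]
    rw [hsl] at hx
    refine ⟨xs[k], x, ?_, by simp⟩
    have hdropk : xs.drop k = xs[k] :: xs.drop (k + 1) := List.drop_eq_getElem_cons hk
    have h1 : [xs[k], x].Sublist (xs[k] :: xs.drop (k + 1)) :=
      List.Sublist.cons₂ _ (List.singleton_sublist.mpr hx)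
    exact (hdropk ▸ h1).trans (List.drop_sublist k xs)
  · rintro ⟨a, b, hsub, rfl⟩
    obtain ⟨l1, l2, rfl, hb⟩ := sublist_pair_decomp hsub
    have hk : l1.length < (l1 ++ a :: l2).length := by simp
    refine ⟨(0 + (l1.length : Int), (l1 ++ a :: l2)[l1.length]), ?_, ?_⟩
    · exact (PySem.List.mem_enumerate_iff _ _ _).mpr ⟨l1.length, hk, rfl⟩
    · have hget : (l1 ++ a :: l2)[l1.length] = a := by
        simp
      have hsl : PySem.List.slice (l1 ++ a :: l2) (some ((0 + (l1.length : Int), (l1 ++ a :: l2)[l1.length]).1 + 1)) none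
          = (l1 ++ a :: l2).drop (l1.length + 1) := by
        have : ((0 + (l1.length : Int), (l1 ++ a :: l2)[l1.length]).1 + 1) = ((l1.length + 1 : Nat) : Int) := by
          push_cast; ring
        rw [this, PySem.List.slice_from_natCast]
      rw [hsl]
      have hdrop : (l1 ++ a :: l2).drop (l1.length + 1) = l2 := by
        rw [show l1.length + 1 = (l1 ++ [a]).length by simp]
        rw [show l1 ++ a :: l2 = (l1 ++ [a]) ++ l2 by simp]
        exact List.drop_left
      rw [hdrop]
      exact List.mem_map.mpr ⟨b, hb, by rw [hget]⟩

lemma hasDiff_nonneg {t : Int} {xs : List Int} (hst : xs.Pairwise (· ≤ ·))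
    (h : HasDiff t xs) : 0 ≤ t := by
  obtain ⟨a, b, hab, rfl⟩ := h
  have := hst.sublist hab
  simp at this; omega

-- duplicate characterisation: gap 0 in the sorted list ↔ the unsorted list is not Nodup
lemma hasDiff_zero_iff (H : List Int) :
    HasDiff 0 (PySem.List.sorted H (fun x => x) false) ↔ ¬ H.Nodup := by
  have hperm : (PySem.List.sorted H (fun x => x) false).Perm H := PySem.List.sorted_perm _ _ _
  constructor
  · rintro ⟨a, b, hsub, hab⟩
    have hb : b = a := by omega
    subst hb
    intro hnd
    have : ([b, b] : List Int).Nodup := ((hperm.nodup_iff).mpr hnd).sublist hsub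
    simp at this
  · intro hnd
    have hnd' : ¬ (PySem.List.sorted H (fun x => x) false).Nodup := fun h => hnd ((hperm.nodup_iff).mp h)
    rw [List.nodup_iff_count_le_one] at hnd'
    push_neg at hnd'
    obtain ⟨a, ha⟩ := hnd'
    refine ⟨a, a, ?_, by ring⟩
    have : (List.replicate 2 a).Sublist (PySem.List.sorted H (fun x => x) false) :=
      List.replicate_sublist_iff.mpr (by omega)
    simpa [List.replicate] using this

-- positive gap characterisation over the unsorted list
lemma hasDiff_pos_iff (H : List Int) (d : Int) (hd : 0 < d) :
    HasDiff d (PySem.List.sorted H (fun x => x) false) ↔ ∃ a ∈ H, ∃ b ∈ H, a - b = d := by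
  constructor
  · rintro ⟨a, b, hsub, hab⟩
    have ha : a ∈ H := (PySem.List.mem_sorted _ _ _ _).mp (hsub.subset (by simp))
    have hb : b ∈ H := (PySem.List.mem_sorted _ _ _ _).mp (hsub.subset (by simp))
    exact ⟨b, hb, a, ha, by omega⟩
  · rintro ⟨a, ha, b, hb, hab⟩
    have ha' : a ∈ PySem.List.sorted H (fun x => x) false := (PySem.List.mem_sorted _ _ _ _).mpr ha
    have hb' : b ∈ PySem.List.sorted H (fun x => x) false := (PySem.List.mem_sorted _ _ _ _).mpr hb
    exact ⟨b, a, pair_sublist_of_sorted (PySem.List.sorted_pairwise _ _) hb' ha' (by omega), hab⟩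

-- the core equality, on the already-extended, sorted fence lists
lemma core_eq (hs vs : List Int) (hh : hs.Pairwise (· ≤ ·)) (hv : vs.Pairwise (· ≤ ·))
    (hhne : hs ≠ []) (hvne : vs ≠ [])
    (hD : (HasDiff 0 hs ∨ HasDiff 0 vs) →
          (HasDiff 0 hs ∧ HasDiff 0 vs) ∨ ∃ d, 0 < d ∧ HasDiff d hs ∧ HasDiff d vs) :
    List.foldl max (-1) (emits (pairsL hs vs) (fun _ => none))
      = (match PySem.List.max? (PySem.Set.inter (pyDiffs hs) (pyDiffs vs)) (fun x => x) with
         | none => -1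
         | some s => s ^ 2) := by
  have hin : ∀ u : Int, u ∈ PySem.Set.inter (pyDiffs hs) (pyDiffs vs) ↔ HasDiff u hs ∧ HasDiff u vs := by
    intro u; rw [PySem.Set.mem_inter, mem_pyDiffs_iff, mem_pyDiffs_iff]
  have hsound := emits_sound hh hv (pairsL hs vs) [] (fun _ => none) rfl
    (fun d h1 hcon => by cases hcon)
  cases hmax : PySem.List.max? (PySem.Set.inter (pyDiffs hs) (pyDiffs vs)) (fun x => x) with
  | none =>
    have hnil := (PySem.List.max?_eq_none_iff _ _).mp hmax
    have hnomem : ∀ u : Int, ¬ (HasDiff u hs ∧ HasDiff u vs) := by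
      intro u hu
      have : u ∈ ([] : List Int) := hnil ▸ (hin u).mpr hu
      simp at this
    have hemp : emits (pairsL hs vs) (fun _ => none) = [] := by
      rw [List.eq_nil_iff_forall_not_mem]
      intro c hc
      obtain ⟨t, _, _, hside⟩ := hsound c hc
      rcases hside with hcom | ⟨_, hdup⟩
      · exact hnomem t hcom
      · rcases hD hdup with hboth | ⟨d, _, hdc⟩
        · exact hnomem 0 hboth
        · exact hnomem d hdc
    rw [hemp]
    rfl
  | some smax =>
    have hsmem := PySem.List.max?_mem hmax
    have hcomMax : HasDiff smax hs ∧ HasDiff smax vs := (hin smax).mp hsmem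
    have hsm0 : 0 ≤ smax := hasDiff_nonneg hh hcomMax.1
    have hub : ∀ c ∈ emits (pairsL hs vs) (fun _ => none), c ≤ smax ^ 2 := by
      intro c hc
      obtain ⟨t, ht0, rfl, hside⟩ := hsound c hc
      have htle : t ≤ smax := by
        rcases hside with hcom | ⟨rfl, _⟩
        · exact PySem.List.max?_isMax hmax t ((hin t).mpr hcom)
        · exact hsm0
      have := mul_self_le_mul_self ht0 htle
      simpa [pow_two] using this
    obtain ⟨c, hc, hcle⟩ := emits_reaches hh hhne hvne (Or.inl hcomMax) hsm0
    have hle1 : smax ^ 2 ≤ List.foldl max (-1) (emits (pairsL hs vs) (fun _ => none)) :=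
      le_trans hcle ((PySem.List.le_foldl_max _ _).2 c hc)
    have hle2 : List.foldl max (-1) (emits (pairsL hs vs) (fun _ => none)) ≤ smax ^ 2 := by
      rcases PySem.List.foldl_max_mem (emits (pairsL hs vs) (fun _ => none)) (-1) with heq | hmem
      · rw [heq]; nlinarith [mul_self_nonneg smax, pow_two smax]
      · exact hub _ hmem
    have hred : (match some smax with | none => (-1 : Int) | some s => s ^ 2) = smax ^ 2 := rfl
    rw [hred]
    omega

-- the port's inline inner loop, flattened over the pair list
lemma loopA_flat' (hs vs : List Int) (init : Int × PySem.Dict (Int × Int) (Int × Int)) :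
    hs.foldl (fun (s : Int × PySem.Dict (Int × Int) (Int × Int)) h =>
      vs.foldl (fun s v =>
        let minEdge := min h v
        let offset := (h - minEdge, v - minEdge)
        match s.2.get? offset with
        | some hv => (max s.1 ((h - hv.1) ^ 2), s.2)
        | none => (s.1, s.2.insert offset (h, v))) s) init
      = (pairsL hs vs).foldl stepA init := loopA_flat hs vs init

-- ¬D_ (with m ≠ n) delivers core_eq's hypothesis on the sorted extended lists
lemma notD_hD {m n : Int} {hF vF : List Int} (hmn : m ≠ n)
    (hnD : ¬ D_maximizeSquareArea m n hF vF) :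
    (HasDiff 0 (PySem.List.sorted (hF ++ [m, 1]) (fun x => x) false) ∨
     HasDiff 0 (PySem.List.sorted (vF ++ [n, 1]) (fun x => x) false)) →
    (HasDiff 0 (PySem.List.sorted (hF ++ [m, 1]) (fun x => x) false) ∧
     HasDiff 0 (PySem.List.sorted (vF ++ [n, 1]) (fun x => x) false)) ∨
    ∃ d, 0 < d ∧ HasDiff d (PySem.List.sorted (hF ++ [m, 1]) (fun x => x) false) ∧
               HasDiff d (PySem.List.sorted (vF ++ [n, 1]) (fun x => x) false) := by
  intro hdup
  unfold D_maximizeSquareArea at hnD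
  simp only [] at hnD
  rw [hasDiff_zero_iff, hasDiff_zero_iff] at hdup
  by_cases hY : ∀ a ∈ hF ++ [m, 1], ∀ b ∈ hF ++ [m, 1], ∀ c ∈ vF ++ [n, 1],
      ∀ d ∈ vF ++ [n, 1], a - b = c - d → a ≤ b
  · have hX : ¬ ((hF ++ [m, 1]).Nodup ↔ ¬ (vF ++ [n, 1]).Nodup) := by
      intro hx; exact hnD ⟨hmn, hx, hY⟩
    left
    rw [hasDiff_zero_iff, hasDiff_zero_iff]
    tauto
  · push_neg at hY
    obtain ⟨a, ha, b, hb, c, hc, d, hd, heq, hlt⟩ := hY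
    refine Or.inr ⟨a - b, by omega, ?_, ?_⟩
    · exact (hasDiff_pos_iff _ _ (by omega)).mpr ⟨a, ha, b, hb, rfl⟩
    · exact (hasDiff_pos_iff _ _ (by omega)).mpr ⟨c, hc, d, hd, heq.symm⟩

-- ===== VERDICT (by name: the statements are the Claim_ definitions above) =====
theorem maximizeSquareArea_spec : Claim_unchanged_maximizeSquareArea := by
  intro m n hF vF _
  unfold Spec_maximizeSquareArea
  intro hnD
  unfold maximizeSquareArea maximizeSquareArea_alt
  by_cases hmn : (m == n) = true
  · rw [if_pos hmn, if_pos hmn]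
  · rw [if_neg hmn, if_neg hmn]
    have hmne : m ≠ n := by simpa using hmn
    have happ : (hF ++ [m]) ++ [1] = hF ++ [m, 1] := by simp
    rw [happ]
    have happv : (vF ++ [n]) ++ [1] = vF ++ [n, 1] := by simp
    rw [happv]
    have hh : (PySem.List.sorted (hF ++ [m, 1]) (fun x => x) false).Pairwise (· ≤ ·) :=
      PySem.List.sorted_pairwise _ _
    have hv : (PySem.List.sorted (vF ++ [n, 1]) (fun x => x) false).Pairwise (· ≤ ·) :=
      PySem.List.sorted_pairwise _ _
    have hhne : (PySem.List.sorted (hF ++ [m, 1]) (fun x => x) false) ≠ [] := by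
      rw [Ne, PySem.List.sorted_eq_nil_iff]; simp
    have hvne : (PySem.List.sorted (vF ++ [n, 1]) (fun x => x) false) ≠ [] := by
      rw [Ne, PySem.List.sorted_eq_nil_iff]; simp
    have hle := loop_emits
      (pairsL (PySem.List.sorted (hF ++ [m, 1]) (fun x => x) false)
        (PySem.List.sorted (vF ++ [n, 1]) (fun x => x) false))
      (fun _ => none) (-1) PySem.Dict.empty relFD_empty
    have hcore := core_eq _ _ hh hv hhne hvne (notD_hD hmne hnD)
    simp only [loopA_flat', hle, hcore]
    cases hmax : PySem.List.max?
        (PySem.Set.inter (pyDiffs (PySem.List.sorted (hF ++ [m, 1]) (fun x => x) false))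
          (pyDiffs (PySem.List.sorted (vF ++ [n, 1]) (fun x => x) false))) (fun x => x) with
    | none => norm_num
    | some s =>
      have h0 : (0 : Int) ≤ s ^ 2 := by positivity
      simp only []
      rw [if_pos (by omega : (s : Int) ^ 2 ≥ 0)]

theorem maximizeSquareArea_changed : Claim_changed_maximizeSquareArea := by
  unfold Claim_changed_maximizeSquareArea; decide

theorem maximizeSquareArea_tight : Claim_exact_maximizeSquareArea := by
  intro m n hF vF _ hD
  obtain ⟨hmne, hdupOne, hnoCom⟩ := hD
  have hmn : ¬ ((m == n) = true) := by simpa using hmne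
  unfold maximizeSquareArea maximizeSquareArea_alt
  rw [if_neg hmn, if_neg hmn]
  have happ : (hF ++ [m]) ++ [1] = hF ++ [m, 1] := by simp
  rw [happ]
  have happv : (vF ++ [n]) ++ [1] = vF ++ [n, 1] := by simp
  rw [happv]
  have hh : (PySem.List.sorted (hF ++ [m, 1]) (fun x => x) false).Pairwise (· ≤ ·) :=
    PySem.List.sorted_pairwise _ _
  have hhne : (PySem.List.sorted (hF ++ [m, 1]) (fun x => x) false) ≠ [] := by
    rw [Ne, PySem.List.sorted_eq_nil_iff]; simp
  have hvne : (PySem.List.sorted (vF ++ [n, 1]) (fun x => x) false) ≠ [] := by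
    rw [Ne, PySem.List.sorted_eq_nil_iff]; simp
  -- B's intersection is empty, so B returns -1
  have hemptyI : ∀ u : Int,
      u ∉ PySem.Set.inter (pyDiffs (PySem.List.sorted (hF ++ [m, 1]) (fun x => x) false))
            (pyDiffs (PySem.List.sorted (vF ++ [n, 1]) (fun x => x) false)) := by
    intro u hu
    rw [PySem.Set.mem_inter, mem_pyDiffs_iff, mem_pyDiffs_iff] at hu
    have hu0 : 0 ≤ u := hasDiff_nonneg hh hu.1
    rcases lt_or_eq_of_le hu0 with hpos | hzero
    · obtain ⟨a, ha, b, hb, hab⟩ := (hasDiff_pos_iff _ _ hpos).mp hu.1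
      obtain ⟨c, hc, d, hd, hcd⟩ := (hasDiff_pos_iff _ _ hpos).mp hu.2
      have := hnoCom a ha b hb c hc d hd (by omega)
      omega
    · have hH := (hasDiff_zero_iff (hF ++ [m, 1])).mp (hzero ▸ hu.1)
      have hV := (hasDiff_zero_iff (vF ++ [n, 1])).mp (hzero ▸ hu.2)
      tauto
  have hmaxnone : PySem.List.max?
      (PySem.Set.inter (pyDiffs (PySem.List.sorted (hF ++ [m, 1]) (fun x => x) false))
        (pyDiffs (PySem.List.sorted (vF ++ [n, 1]) (fun x => x) false))) (fun x => x) = none := by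
    rw [PySem.List.max?_eq_none_iff]
    rw [List.eq_nil_iff_forall_not_mem]
    exact hemptyI
  -- A's running max reaches 0 from the duplicated fence, so A returns a nonnegative value
  have hdup : HasDiff 0 (PySem.List.sorted (hF ++ [m, 1]) (fun x => x) false) ∨
      HasDiff 0 (PySem.List.sorted (vF ++ [n, 1]) (fun x => x) false) := by
    rw [hasDiff_zero_iff, hasDiff_zero_iff]
    tauto
  obtain ⟨c, hc, hcle⟩ := emits_reaches hh hhne hvne (Or.inr ⟨rfl, hdup⟩) (le_refl 0)
  have hle := loop_emits
    (pairsL (PySem.List.sorted (hF ++ [m, 1]) (fun x => x) false)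
      (PySem.List.sorted (vF ++ [n, 1]) (fun x => x) false))
    (fun _ => none) (-1) PySem.Dict.empty relFD_empty
  simp only [loopA_flat', hle, hmaxnone]
  have hans0 : (0 : Int) ≤ List.foldl max (-1)
      (emits (pairsL (PySem.List.sorted (hF ++ [m, 1]) (fun x => x) false)
        (PySem.List.sorted (vF ++ [n, 1]) (fun x => x) false)) (fun _ => none)) := by
    calc (0 : Int) ≤ c := by simpa using hcle
    _ ≤ _ := (PySem.List.le_foldl_max _ _).2 c hc
  rw [if_pos (by omega : List.foldl max (-1)
      (emits (pairsL (PySem.List.sorted (hF ++ [m, 1]) (fun x => x) false)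
        (PySem.List.sorted (vF ++ [n, 1]) (fun x => x) false)) (fun _ => none)) ≥ 0)]
  have hmodpos : 0 ≤ PySem.Int.mod (List.foldl max (-1)
      (emits (pairsL (PySem.List.sorted (hF ++ [m, 1]) (fun x => x) false)
        (PySem.List.sorted (vF ++ [n, 1]) (fun x => x) false)) (fun _ => none))) (10 ^ 9 + 7) :=
    PySem.Int.mod_nonneg _ (by norm_num)
  omega
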